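-- pv_equiv track=rewrite | github.com/checksumHashi/racunarski-alati | Petlja_Takmicanje_2023-24/Najblizi_Neprijatelj.py | func
-- ===== SOURCE A (Python) =====
-- def func(length:int, cords: list) -> int:
--     if length == 1: return 0
--
--     left = right = cords.index(1)
--     count = 1
--     while True:
--         left -= 1
--         right += 1
--         if left < 0: left = length - 1
--         if right > length - 1: right = 0
--         if cords[left] == 2:
--             return count
--         if cords[right] == 2:
--             return count
--         count += 1
--     return
-- ===== SOURCE B (Python) =====
-- def func(length: int, cords: list) -> int:
--     if length == 1:
--         return 0
--     p = cords.index(1)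
--     return min(min(abs(i - p), length - abs(i - p))
--                for i, v in enumerate(cords) if v == 2)
-- ===== Notes on version B (the rewrite author's own statement) =====
-- stated objective: simpler
-- what changed: Replaces the stateful two-pointer outward expansion with wraparound bookkeeping by a single pass taking the minimum circular distance min(|i-p|, length-|i-p|) over all positions holding a 2.
-- outside the precondition, e.g. on func(2, [2, 2, 1]): A returns 1, B returns 0
import Mathlib
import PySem

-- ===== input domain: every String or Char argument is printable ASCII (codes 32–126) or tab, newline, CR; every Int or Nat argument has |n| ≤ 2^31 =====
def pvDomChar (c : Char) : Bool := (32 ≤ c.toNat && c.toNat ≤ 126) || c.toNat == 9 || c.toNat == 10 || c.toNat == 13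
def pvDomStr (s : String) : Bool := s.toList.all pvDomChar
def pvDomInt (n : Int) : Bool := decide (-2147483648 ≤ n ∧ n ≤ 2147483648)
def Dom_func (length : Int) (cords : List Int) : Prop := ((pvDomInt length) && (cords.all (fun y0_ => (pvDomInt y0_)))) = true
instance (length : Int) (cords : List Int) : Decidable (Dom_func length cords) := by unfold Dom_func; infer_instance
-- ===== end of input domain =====

-- B replaces A's two-pointer outward expansion by a single min-scan of circular distances; equally fast, simpler.

-- ===== PORT A =====
-- A's 'while True' loop; the fuel (cords.length + 1) only makes it total — inside Pre_func the
-- loop returns before the fuel runs out, so the 0-returning fuel-out branch is never reached.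
def funcLoop (length : Int) (cords : List Int) : Int → Int → Int → Nat → Int
  | _, _, _, 0 => 0
  | left, right, count, fuel+1 =>
    let left := left - 1
    let right := right + 1
    let left := if left < 0 then length - 1 else left
    let right := if right > length - 1 then 0 else right
    match PySem.List.pyGet? cords left with
    | none => 0          -- IndexError (outside Pre_func)
    | some a =>
      if a = 2 then count
      else
        match PySem.List.pyGet? cords right with
        | none => 0      -- IndexError (outside Pre_func)
        | some b =>
          if b = 2 then count
          else funcLoop length cords left right (count + 1) fuel

def func (length : Int) (cords : List Int) : Int :=
  if length = 1 then 0
  else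
    match PySem.List.index? cords 1 with
    | none => 0          -- ValueError from cords.index(1) (outside Pre_func)
    | some idx => funcLoop length cords (idx : Int) (idx : Int) 1 (cords.length + 1)

-- ===== PORT B =====
def func_alt (length : Int) (cords : List Int) : Int :=
  if length = 1 then 0
  else
    match PySem.List.index? cords 1 with
    | none => 0          -- ValueError from cords.index(1) (outside Pre_func)
    | some idx =>
      let p : Int := (idx : Int)
      let ds := (PySem.List.enumerate cords 0).filterMap
        (fun iv => if iv.2 = 2 then some (min |iv.1 - p| (length - |iv.1 - p|)) else none)
      match PySem.List.min? ds (fun x => x) with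
      | some m => m
      | none => 0        -- ValueError: min() of empty sequence (outside Pre_func)

-- ===== PRECONDITION & SPEC =====
-- Pre_ excludes inputs where the declared length differs from len(cords) (A's wraparound then
-- indexes an inconsistent prefix/suffix and raises, loops forever, or returns an accidental value)
-- and inputs without a 1 (A raises ValueError) or without a 2 (A loops forever).
def Pre_func (length : Int) (cords : List Int) : Prop :=
  length = 1 ∨ (length = (cords.length : Int) ∧ (1 : Int) ∈ cords ∧ (2 : Int) ∈ cords)
instance (length : Int) (cords : List Int) : Decidable (Pre_func length cords) := by unfold Pre_func; infer_instance

def pvWitness_func : Int × List Int := (4, [0, 1, 0, 2])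

def Spec_func (length : Int) (cords : List Int) (out : Int) : Prop := out = func_alt length cords
instance (length : Int) (cords : List Int) (out : Int) : Decidable (Spec_func length cords out) := by unfold Spec_func; infer_instance

-- ===== CLAIM (what is proved, stated in full; the proofs are below) =====
def Claim_equal_func : Prop := ∀ (length : Int) (cords : List Int), Dom_func length cords → Pre_func length cords → Spec_func length cords (func length cords)

-- ===== LEMMAS AND PROOFS =====

-- the element at circular position x (mod n) of cords
def gAt (cords : List Int) (n x : Int) : Int := PySem.List.pyGetD cords (x % n) 0

-- linear search for the least c ≥ start with a 2 at circular distance c from p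
def search (cords : List Int) (n p : Int) : Int → Nat → Int
  | _, 0 => 0
  | c, fuel+1 =>
    if gAt cords n (p - c) = 2 ∨ gAt cords n (p + c) = 2 then c
    else search cords n p (c + 1) fuel


theorem emod_bounds (n x : Int) (hn : 0 < n) : 0 ≤ x % n ∧ x % n < n :=
  ⟨Int.emod_nonneg x (by omega), Int.emod_lt_of_pos x hn⟩

theorem stepL (n x : Int) (hn : 0 < n) :
    (if x % n - 1 < 0 then n - 1 else x % n - 1) = (x - 1) % n := by
  have hb := emod_bounds n x hn
  have h1 : (x - 1) % n = (x % n - 1) % n := by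
    conv_rhs => rw [Int.sub_emod, Int.emod_emod_of_dvd _ dvd_rfl, ← Int.sub_emod]
  by_cases h : x % n - 1 < 0
  · have hx0 : x % n = 0 := by omega
    rw [if_pos h, h1, hx0]
    have e : (0 - 1 : Int) = (n - 1) + n * (-1) := by ring
    rw [e, Int.add_mul_emod_self_left, Int.emod_eq_of_lt (a := n - 1) (by omega) (by omega)]
  · rw [if_neg h, h1, Int.emod_eq_of_lt (a := x % n - 1) (by omega) (by omega)]

theorem stepR (n x : Int) (hn : 0 < n) :
    (if x % n + 1 > n - 1 then 0 else x % n + 1) = (x + 1) % n := by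
  have hb := emod_bounds n x hn
  have h1 : (x + 1) % n = (x % n + 1) % n := by
    conv_rhs => rw [Int.add_emod, Int.emod_emod_of_dvd _ dvd_rfl, ← Int.add_emod]
  by_cases h : x % n + 1 > n - 1
  · have hx0 : x % n = n - 1 := by omega
    rw [if_pos h, h1, hx0]
    have e : (n - 1 + 1 : Int) = 0 + n * 1 := by ring
    rw [e, Int.add_mul_emod_self_left, Int.emod_eq_of_lt (a := 0) le_rfl hn]
  · rw [if_neg h, h1, Int.emod_eq_of_lt (a := x % n + 1) (by omega) (by omega)]

theorem pyGetD_at (cords : List Int) (y : Int) (h0 : 0 ≤ y) (h1 : y.toNat < cords.length) :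
    PySem.List.pyGetD cords y 0 = cords[y.toNat] := by
  have hy : ((y.toNat : Int)) = y := Int.toNat_of_nonneg h0
  conv_lhs => rw [← hy]
  rw [PySem.List.pyGetD_natCast, List.getD_eq_getElem _ _ h1]

theorem pyGet?_inrange (cords : List Int) (y : Int) (h0 : 0 ≤ y) (h1 : y.toNat < cords.length) :
    PySem.List.pyGet? cords y = some (PySem.List.pyGetD cords y 0) := by
  have hy : ((y.toNat : Int)) = y := Int.toNat_of_nonneg h0
  rw [← hy, PySem.List.pyGet?_natCast, PySem.List.pyGetD_natCast,
     List.getElem?_eq_getElem h1, List.getD_eq_getElem _ _ h1]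

theorem hit_dist (n p j i : Int) (hn : 0 < n) (hp0 : 0 ≤ p) (hp1 : p < n)
    (hj0 : 0 ≤ j) (hj1 : j ≤ n)
    (hi : i = (p - j) % n ∨ i = (p + j) % n) :
    min |i - p| (n - |i - p|) ≤ j := by
  have hib : 0 ≤ i ∧ i < n := by
    rcases hi with h | h <;> (rw [h]; exact emod_bounds n _ hn)
  have habs : |i - p| = j ∨ |i - p| = n - j := by
    rcases hi with h | h
    · obtain ⟨c, hc⟩ : ∃ c : Int, i - p + j = n * c :=
        ⟨-((p - j) / n), by rw [h, Int.emod_def]; ring⟩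
      have hub : i - p + j < n * 2 := by omega
      have hlb : n * (-1) < i - p + j := by omega
      have hc1 : c < 2 := lt_of_mul_lt_mul_left (hc ▸ hub) (by omega)
      have hc2 : -1 < c := lt_of_mul_lt_mul_left (hc ▸ hlb) (by omega)
      interval_cases c <;>
        rcases abs_cases (i - p) with ⟨h1, _⟩ | ⟨h1, _⟩ <;> omega
    · obtain ⟨c, hc⟩ : ∃ c : Int, i - p - j = n * c :=
        ⟨-((p + j) / n), by rw [h, Int.emod_def]; ring⟩
      have hub : i - p - j < n * 1 := by omega
      have hlb : n * (-2) < i - p - j := by omega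
      have hc1 : c < 1 := lt_of_mul_lt_mul_left (hc ▸ hub) (by omega)
      have hc2 : -2 < c := lt_of_mul_lt_mul_left (hc ▸ hlb) (by omega)
      interval_cases c <;>
        rcases abs_cases (i - p) with ⟨h1, _⟩ | ⟨h1, _⟩ <;> omega
  rcases habs with h | h
  · calc min |i - p| (n - |i - p|) ≤ |i - p| := min_le_left _ _
      _ = j := h
  · calc min |i - p| (n - |i - p|) ≤ n - |i - p| := min_le_right _ _
      _ = j := by omega

theorem mem_ds_iff (cords : List Int) (n p x : Int) :
    x ∈ (PySem.List.enumerate cords 0).filterMap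
        (fun iv => if iv.2 = 2 then some (min |iv.1 - p| (n - |iv.1 - p|)) else none) ↔
      ∃ (k : Nat) (hk : k < cords.length), cords[k] = 2 ∧ x = min |(k : Int) - p| (n - |(k : Int) - p|) := by
  constructor
  · intro hx
    rcases List.mem_filterMap.1 hx with ⟨iv, hiv, hfx⟩
    rcases (PySem.List.mem_enumerate_iff _ _ _).1 hiv with ⟨k, hk, rfl⟩
    by_cases h2 : cords[k] = 2
    · refine ⟨k, hk, h2, ?_⟩
      simp [h2] at hfx
      omega
    · simp [h2] at hfx
  · rintro ⟨k, hk, h2, rfl⟩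
    refine List.mem_filterMap.2 ⟨((0 : Int) + k, cords[k]), ?_, ?_⟩
    · exact (PySem.List.mem_enumerate_iff _ _ _).2 ⟨k, hk, rfl⟩
    · simp [h2]

-- funcLoop, started in the state A reaches at count = c, is the linear search from c
theorem funcLoop_eq_search (cords : List Int) (n p : Int) (hn : 0 < n)
    (hlen : n = (cords.length : Int)) :
    ∀ (fuel : Nat) (c : Int),
      funcLoop n cords ((p - (c - 1)) % n) ((p + (c - 1)) % n) c fuel = search cords n p c fuel := by
  intro fuel
  induction fuel with
  | zero => intro c; rfl
  | succ fuel ih =>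
    intro c
    have hl : (if (p - (c - 1)) % n - 1 < 0 then n - 1 else (p - (c - 1)) % n - 1) = (p - c) % n := by
      rw [stepL n (p - (c - 1)) hn]; ring_nf
    have hr : (if (p + (c - 1)) % n + 1 > n - 1 then 0 else (p + (c - 1)) % n + 1) = (p + c) % n := by
      rw [stepR n (p + (c - 1)) hn]; ring_nf
    have hbL := emod_bounds n (p - c) hn
    have hbR := emod_bounds n (p + c) hn
    have hgl : PySem.List.pyGet? cords ((p - c) % n) = some (gAt cords n (p - c)) :=
      pyGet?_inrange cords _ hbL.1 (by omega)
    have hgr : PySem.List.pyGet? cords ((p + c) % n) = some (gAt cords n (p + c)) :=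
      pyGet?_inrange cords _ hbR.1 (by omega)
    show funcLoop n cords _ _ c (fuel + 1) = _
    rw [funcLoop, search]
    simp only [hl, hr, hgl, hgr]
    by_cases h1 : gAt cords n (p - c) = 2
    · simp [h1]
    · by_cases h2 : gAt cords n (p + c) = 2
      · simp [h1, h2]
      · rw [if_neg h1, if_neg h2,
            if_neg (show ¬(gAt cords n (p - c) = 2 ∨ gAt cords n (p + c) = 2) by simp [h1, h2])]
        have hrec := ih (c + 1)
        rw [show p - (c + 1 - 1) = p - c by ring, show p + (c + 1 - 1) = p + c by ring] at hrec
        exact hrec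

-- the linear search returns the least hit
theorem search_eq (cords : List Int) (n p m : Int)
    (hm : gAt cords n (p - m) = 2 ∨ gAt cords n (p + m) = 2) :
    ∀ (fuel : Nat) (c : Int), c ≤ m →
      (∀ j, c ≤ j → j < m → ¬(gAt cords n (p - j) = 2 ∨ gAt cords n (p + j) = 2)) →
      m < c + fuel → search cords n p c fuel = m := by
  intro fuel
  induction fuel with
  | zero => intro c hc _ hf; omega
  | succ fuel ih =>
    intro c hc hmin hf
    rw [search]
    by_cases h : gAt cords n (p - c) = 2 ∨ gAt cords n (p + c) = 2
    · rw [if_pos h]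
      by_contra hne
      exact hmin c le_rfl (by omega) h
    · rw [if_neg h]
      have hcm : c < m := by
        rcases lt_or_eq_of_le hc with h' | h'
        · exact h'
        · exact absurd (h' ▸ hm) h
      exact ih (c + 1) (by omega) (fun j hj1 hj2 => hmin j (by omega) hj2) (by omega)

-- a 2 at index k gives a hit at its circular distance
theorem dist_hit (n p k : Int)
    (hk0 : 0 ≤ k) (hk1 : k < n) :
    (p - min |k - p| (n - |k - p|)) % n = k ∨ (p + min |k - p| (n - |k - p|)) % n = k := by
  have hself : k % n = k := Int.emod_eq_of_lt hk0 hk1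
  rcases abs_cases (k - p) with ⟨ha, _⟩ | ⟨ha, _⟩
  · rcases min_cases |k - p| (n - |k - p|) with ⟨hmv, _⟩ | ⟨hmv, _⟩
    · right; rw [hmv, ha, show p + (k - p) = k by ring, hself]
    · left; rw [hmv, ha, show p - (n - (k - p)) = k + n * (-1) by ring,
        Int.add_mul_emod_self_left, hself]
  · rcases min_cases |k - p| (n - |k - p|) with ⟨hmv, _⟩ | ⟨hmv, _⟩
    · left; rw [hmv, ha, show p - -(k - p) = k by ring, hself]
    · right; rw [hmv, ha, show p + (n - -(k - p)) = k + n * 1 by ring,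
        Int.add_mul_emod_self_left, hself]

-- ===== VERDICT (by name: the statement is the Claim_ definition above) =====
theorem func_spec : Claim_equal_func := by
  intro length cords _ hpre
  unfold Spec_func
  by_cases h1 : length = 1
  · simp [func, func_alt, h1]
  rcases hpre with h | ⟨hlen, hmem1, hmem2⟩
  · exact absurd h h1
  have hn : (0 : Int) < length := by
    rcases List.getElem_of_mem hmem1 with ⟨k1, hk1, _⟩
    omega
  have hidx : ∃ idx, PySem.List.index? cords 1 = some idx :=
    Option.isSome_iff_exists.1 ((PySem.List.index?_isSome_iff (xs := cords) (v := 1)).2 hmem1)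
  rcases hidx with ⟨idx, hidx⟩
  rcases PySem.List.getElem_of_index?_eq_some hidx with ⟨hidxlt, hidx1, _⟩
  set p : Int := (idx : Int) with hp
  have hp0 : 0 ≤ p := by positivity
  have hp1 : p < length := by omega
  set ds := (PySem.List.enumerate cords 0).filterMap
      (fun iv => if iv.2 = 2 then some (min |iv.1 - p| (length - |iv.1 - p|)) else none) with hds
  have hdsne : ds ≠ [] := by
    rcases List.getElem_of_mem hmem2 with ⟨k2, hk2, hk2v⟩
    intro hnil
    have hm2 : (min |(k2 : Int) - p| (length - |(k2 : Int) - p|)) ∈ ds :=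
      (mem_ds_iff cords length p _).2 ⟨k2, hk2, hk2v, rfl⟩
    rw [hnil] at hm2
    simp at hm2
  have hmin : ∃ m, PySem.List.min? ds (fun x => x) = some m := by
    cases hmo : PySem.List.min? ds (fun x => x) with
    | none => exact absurd ((PySem.List.min?_eq_none_iff ds (fun x => x)).1 hmo) hdsne
    | some m => exact ⟨m, rfl⟩
  rcases hmin with ⟨m, hm⟩
  have hmmem := PySem.List.min?_mem hm
  have hmle : ∀ y ∈ ds, m ≤ y := fun y hy => PySem.List.min?_isMin hm y hy
  rcases (mem_ds_iff cords length p m).1 hmmem with ⟨k, hk, hk2, hmval⟩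
  have hk0 : (0 : Int) ≤ (k : Int) := by positivity
  have hk1 : (k : Int) < length := by omega
  have habs1 : |(k : Int) - p| < length := by
    rcases abs_cases ((k : Int) - p) with ⟨h, _⟩ | ⟨h, _⟩ <;> omega
  have habs0 : (0 : Int) ≤ |(k : Int) - p| := abs_nonneg _
  have hmub : m ≤ length := by rw [hmval]; omega
  have hmlb : 1 ≤ m := by
    have hkp : (k : Int) ≠ p := by
      intro hkp'
      have hik : idx = k := by omega
      subst hik
      rw [hidx1] at hk2
      norm_num at hk2
    rw [hmval]
    rcases abs_cases ((k : Int) - p) with ⟨h, _⟩ | ⟨h, _⟩ <;> omega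
  have hgk : PySem.List.pyGetD cords ((k : Int)) 0 = 2 := by
    have := pyGetD_at cords (k : Int) hk0 (by simpa using hk)
    simpa using this.trans (by simpa using hk2)
  have hhit : gAt cords length (p - m) = 2 ∨ gAt cords length (p + m) = 2 := by
    have hd := dist_hit length p (k : Int) hk0 hk1
    rcases hmval ▸ hd with h | h
    · left; unfold gAt; rw [h]; exact hgk
    · right; unfold gAt; rw [h]; exact hgk
  have hmin' : ∀ j, (1 : Int) ≤ j → j < m →
      ¬(gAt cords length (p - j) = 2 ∨ gAt cords length (p + j) = 2) := by
    intro j hj1 hj2 hhitj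
    have hj0 : (0 : Int) ≤ j := by omega
    have hjn : j ≤ length := by omega
    have key : ∀ i : Int, (i = (p - j) % length ∨ i = (p + j) % length) →
        PySem.List.pyGetD cords (i % length) 0 = 2 → False := by
      intro i hi hgi
      have hib : 0 ≤ i ∧ i < length := by
        rcases hi with h | h <;> (rw [h]; exact emod_bounds length _ hn)
      have hii : i % length = i := Int.emod_eq_of_lt hib.1 hib.2
      rw [hii] at hgi
      have hitn : i.toNat < cords.length := by omega
      have hcast : ((i.toNat : Int)) = i := by omega
      have hgi' : cords[i.toNat] = 2 := by
        rw [pyGetD_at cords i hib.1 hitn] at hgi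
        exact hgi
      have hmem : (min |((i.toNat : Int)) - p| (length - |((i.toNat : Int)) - p|)) ∈ ds :=
        (mem_ds_iff cords length p _).2 ⟨i.toNat, hitn, hgi', rfl⟩
      have h1' := hmle _ hmem
      rw [hcast] at h1'
      have h2' := hit_dist length p j i hn hp0 hp1 hj0 hjn hi
      omega
    rcases hhitj with h | h
    · exact key ((p - j) % length) (Or.inl rfl)
        (by unfold gAt at h; rwa [Int.emod_emod_of_dvd _ dvd_rfl])
    · exact key ((p + j) % length) (Or.inr rfl)
        (by unfold gAt at h; rwa [Int.emod_emod_of_dvd _ dvd_rfl])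
  have hA : func length cords = m := by
    unfold func
    rw [if_neg h1, hidx]
    show funcLoop length cords (idx : Int) (idx : Int) 1 (cords.length + 1) = m
    have hrun := funcLoop_eq_search cords length p hn hlen (cords.length + 1) 1
    have hinitL : (p - (1 - 1)) % length = p := by
      rw [show p - (1 - 1) = p by ring]; exact Int.emod_eq_of_lt hp0 hp1
    have hinitR : (p + (1 - 1)) % length = p := by
      rw [show p + (1 - 1) = p by ring]; exact Int.emod_eq_of_lt hp0 hp1
    rw [hinitL, hinitR] at hrun
    exact hrun.trans (search_eq cords length p m hhit (cords.length + 1) 1 hmlb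
      (fun j hj1 hj2 => hmin' j hj1 hj2) (by omega))
  have hB : func_alt length cords = m := by
    unfold func_alt
    rw [if_neg h1, hidx]
    show (match PySem.List.min? ds (fun x => x) with | some m => m | none => 0) = m
    rw [hm]
  rw [hA, hB]
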